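-- pv_equiv track=rewrite | github.com/oribar18/NLPhw1 | inference.py | top_10_confused_tags
-- ===== SOURCE A (Python) =====
-- def top_10_confused_tags(cm, tags):
--     top_indexes = []  # List of tuples of the sum of the row (without diagonal value) and the index of the row
--     for i in range(len(cm)):
--         row = cm[i]
--         top_indexes.append((sum([row[j] for j in range(len(cm)) if j != i]), i))
--     top_indexes.sort(reverse=True)
--     top_10_confused_tags = [tags[i] for _, i in top_indexes[:10]]
--     return top_10_confused_tags
-- ===== SOURCE B (Python) =====
-- def top_10_confused_tags(cm, tags):
--     n = len(cm)
--     scores = []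
--     for i, row in enumerate(cm):
--         total = 0
--         for j, v in enumerate(row[:n]):
--             if j != i:
--                 total += v
--         scores.append((total, i))
--     out = []
--     while scores and len(out) < 10:
--         best = max(scores)
--         scores.remove(best)
--         out.append(tags[best[1]])
--     return out
-- ===== Notes on version B (the rewrite author's own statement) =====
-- stated objective: alternative
-- what changed: B replaces A's full descending sort plus [:10] slice by a top-k selection loop that repeatedly extracts the lexicographic maximum with max()/remove() (at most 10 times, ties impossible since indices are distinct), and accumulates each off-diagonal score with a running total over enumerate(row[:n]) instead of summing a filtered index comprehension.
-- outside the precondition, e.g. on top_10_confused_tags([[1, 2], [3]], ['a', 'b']): A returns ['b', 'a'], B returns ['b', 'a']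
import Mathlib
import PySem

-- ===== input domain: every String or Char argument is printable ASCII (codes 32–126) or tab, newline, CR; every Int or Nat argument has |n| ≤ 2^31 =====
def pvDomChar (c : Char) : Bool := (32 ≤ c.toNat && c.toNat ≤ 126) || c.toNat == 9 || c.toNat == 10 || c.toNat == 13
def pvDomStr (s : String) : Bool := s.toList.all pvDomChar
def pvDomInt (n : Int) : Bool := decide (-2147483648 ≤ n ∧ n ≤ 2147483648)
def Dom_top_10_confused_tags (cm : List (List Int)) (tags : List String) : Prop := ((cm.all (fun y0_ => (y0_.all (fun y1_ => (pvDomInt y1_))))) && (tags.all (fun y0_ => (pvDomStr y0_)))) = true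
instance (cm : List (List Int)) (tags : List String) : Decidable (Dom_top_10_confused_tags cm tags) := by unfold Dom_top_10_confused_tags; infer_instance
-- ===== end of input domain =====

-- B replaces A's full descending sort + slice by a top-k SELECTION loop (repeatedly extract the
-- lexicographic maximum with max/remove, at most 10 times), and accumulates each off-diagonal
-- score in a running loop over enumerate(row[:n]) instead of summing a filtered comprehension
-- (objective: alternative; same asymptotic cost, the O(n^2) score pass dominates).

-- ===== PORT A =====
def top_10_confused_tags (cm : List (List Int)) (tags : List String) : List String :=
  (PySem.List.slice
    (PySem.List.sorted2
      ((PySem.List.pyRange 0 (cm.length : Int)).foldl (fun acc i =>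
        acc ++ [((((PySem.List.pyRange 0 (cm.length : Int)).filter (fun j => j != i)).map
                    (fun j => PySem.List.pyGetD (PySem.List.pyGetD cm i []) j 0)).sum, i)]) [])
      (fun p => p.1) (fun p => p.2) true)
    none (some 10)).map (fun p => PySem.List.pyGetD tags p.2 "")

-- ===== PORT B =====
-- the 'while scores and len(out) < 10' selection loop, fuel = remaining capacity of out;
-- 'scores.remove(best)' is exact via remove? — best = max(scores) is always a member, the
-- .getD [] branch is unreachable (Python would raise ValueError there).
def pvSelect (tags : List String) : Nat → List (Int × Int) → List String
  | 0, _ => []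
  | k+1, scores =>
    match PySem.List.max2? scores (fun p => p.1) (fun p => p.2) with
    | none => []
    | some best =>
        PySem.List.pyGetD tags best.2 "" ::
          pvSelect tags k ((PySem.List.remove? scores best).getD [])

def top_10_confused_tags_alt (cm : List (List Int)) (tags : List String) : List String :=
  pvSelect tags 10
    ((PySem.List.enumerate cm).foldl (fun acc p =>
      acc ++ [(((PySem.List.enumerate (PySem.List.slice p.2 none (some (cm.length : Int)))).foldl
                  (fun t q => if q.1 != p.1 then t + q.2 else t) 0), p.1)]) [])

-- ===== PRECONDITION & SPEC =====
-- Pre_ excludes inputs where A raises IndexError (a row shorter than len(cm) that A indexes, or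
-- tags shorter than an index A looks up); it is slightly narrower than A's exact domain: A can
-- still return on a last row of length len(cm)-1 or on short tags whose missing indices happen
-- to miss the top 10 (see claim cites).
def Pre_top_10_confused_tags (cm : List (List Int)) (tags : List String) : Prop :=
  cm.length ≤ tags.length ∧ ∀ row ∈ cm, cm.length ≤ row.length
instance (cm : List (List Int)) (tags : List String) : Decidable (Pre_top_10_confused_tags cm tags) := by unfold Pre_top_10_confused_tags; infer_instance

def pvWitness_top_10_confused_tags : List (List Int) × List String :=
  ([[0, 1], [2, 0]], ["a", "b"])

def Spec_top_10_confused_tags (cm : List (List Int)) (tags : List String) (out : List String) : Prop := out = top_10_confused_tags_alt cm tags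
instance (cm : List (List Int)) (tags : List String) (out : List String) : Decidable (Spec_top_10_confused_tags cm tags out) := by unfold Spec_top_10_confused_tags; infer_instance

-- ===== CLAIM (what is proved, stated in full; the proofs are below) =====
def Claim_equal_top_10_confused_tags : Prop := ∀ (cm : List (List Int)) (tags : List String), Dom_top_10_confused_tags cm tags → Pre_top_10_confused_tags cm tags → Spec_top_10_confused_tags cm tags (top_10_confused_tags cm tags)

-- ===== LEMMAS AND PROOFS =====

-- Python's lexicographic ≥ on int pairs.
def pvLexGe (a b : Int × Int) : Prop := b.1 < a.1 ∨ (b.1 = a.1 ∧ b.2 ≤ a.2)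

theorem pvLexGe_refl (a : Int × Int) : pvLexGe a a := by unfold pvLexGe; omega

theorem pvLexGe_antisymm (a b : Int × Int) (h1 : pvLexGe a b) (h2 : pvLexGe b a) : a = b := by
  unfold pvLexGe at h1 h2
  have : a.1 = b.1 ∧ a.2 = b.2 := by omega
  exact Prod.ext this.1 this.2

theorem pvLexGe_trans (a b c : Int × Int) (h1 : pvLexGe a b) (h2 : pvLexGe b c) : pvLexGe a c := by
  unfold pvLexGe at *; omega

-- insertBy preserves Pairwise R for a total 'before' compatible with a transitive R.
theorem pv_pairwise_insertBy {α : Type} (R : α → α → Prop)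
    (htrans : ∀ a b c, R a b → R b c → R a c)
    (before : α → α → Bool)
    (hT : ∀ a b, before a b = true → R a b)
    (hF : ∀ a b, before a b = false → R b a)
    (x : α) (ys : List α) (h : ys.Pairwise R) :
    (PySem.List.insertBy before x ys).Pairwise R := by
  induction ys with
  | nil => simp [PySem.List.insertBy]
  | cons y ys ih =>
    rw [PySem.List.insertBy]
    obtain ⟨hy, hys⟩ := List.pairwise_cons.mp h
    by_cases hb : before x y = true
    · rw [if_pos hb]
      refine List.Pairwise.cons ?_ h
      intro z hz
      rcases List.mem_cons.mp hz with rfl | hz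
      · exact hT _ _ hb
      · exact htrans _ _ _ (hT _ _ hb) (hy _ hz)
    · rw [if_neg hb]
      refine List.Pairwise.cons ?_ (ih hys)
      intro z hz
      rcases (PySem.List.mem_insertBy before x z ys).mp hz with hz | hz
      · subst hz; exact hF _ _ (Bool.eq_false_iff.mpr hb)
      · exact hy _ hz

theorem pv_pairwise_foldl_insertBy {α : Type} (R : α → α → Prop)
    (htrans : ∀ a b c, R a b → R b c → R a c)
    (before : α → α → Bool)
    (hT : ∀ a b, before a b = true → R a b)
    (hF : ∀ a b, before a b = false → R b a)
    (xs acc : List α) (h : acc.Pairwise R) :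
    (xs.foldl (fun acc x => PySem.List.insertBy before x acc) acc).Pairwise R := by
  induction xs generalizing acc with
  | nil => simpa
  | cons x xs ih =>
    exact ih _ (pv_pairwise_insertBy R htrans before hT hF x acc h)

-- the descending sort is Pairwise pvLexGe.
theorem pv_sortDesc_pairwise (xs : List (Int × Int)) :
    (PySem.List.sorted2 xs (fun p => p.1) (fun p => p.2) true).Pairwise pvLexGe := by
  show (xs.foldl (fun acc x => PySem.List.insertBy
      (fun a b => decide (b.1 < a.1) || (!decide (a.1 < b.1) && decide (b.2 < a.2))) x acc) []).Pairwise pvLexGe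
  apply pv_pairwise_foldl_insertBy pvLexGe pvLexGe_trans
  · intro a b hb
    simp only [Bool.or_eq_true, Bool.and_eq_true, Bool.not_eq_true', decide_eq_true_eq,
      decide_eq_false_iff_not] at hb
    unfold pvLexGe; omega
  · intro a b hb
    simp only [Bool.or_eq_false_iff, Bool.and_eq_false_iff, Bool.not_eq_false',
      decide_eq_true_eq, decide_eq_false_iff_not] at hb
    unfold pvLexGe; omega
  · exact List.Pairwise.nil

-- max2? unfolds to a foldl of pvStep (Python's running max over lexicographic int pairs).
def pvStep (acc : Option (Int × Int)) (x : Int × Int) : Option (Int × Int) :=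
  match acc with
  | none => some x
  | some c => if (decide (c.1 < x.1) || (!decide (x.1 < c.1) && decide (c.2 < x.2))) = true
              then some x else some c

theorem pv_max2_eq_foldl (xs : List (Int × Int)) :
    PySem.List.max2? xs (fun p => p.1) (fun p => p.2) = xs.foldl pvStep none := by
  simp only [PySem.List.max2?]
  congr 1
  funext acc x
  cases acc <;> rfl

-- foldl pvStep spec: the result is a member and a pvLexGe-maximum.
theorem pv_max2_foldl_spec (xs : List (Int × Int)) (a m : Int × Int)
    (h : xs.foldl pvStep (some a) = some m) :
    (m = a ∨ m ∈ xs) ∧ pvLexGe m a ∧ ∀ x ∈ xs, pvLexGe m x := by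
  induction xs generalizing a with
  | nil =>
    simp only [List.foldl_nil, Option.some.injEq] at h
    subst h
    exact ⟨Or.inl rfl, pvLexGe_refl _, fun x hx => absurd hx (List.not_mem_nil)⟩
  | cons x xs ih =>
    simp only [List.foldl_cons, pvStep] at h
    by_cases hc : (decide (a.1 < x.1) || (!decide (x.1 < a.1) && decide (a.2 < x.2))) = true
    · rw [if_pos hc] at h
      obtain ⟨hmem, hge, hall⟩ := ih x h
      simp only [Bool.or_eq_true, Bool.and_eq_true, Bool.not_eq_true', decide_eq_true_eq,
        decide_eq_false_iff_not] at hc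
      have hxa : pvLexGe x a := by unfold pvLexGe; omega
      refine ⟨?_, pvLexGe_trans m x a hge hxa, ?_⟩
      · rcases hmem with rfl | hm
        · exact Or.inr (List.mem_cons_self)
        · exact Or.inr (List.mem_cons_of_mem _ hm)
      · intro y hy
        rcases List.mem_cons.mp hy with rfl | hy
        · exact hge
        · exact hall _ hy
    · rw [if_neg hc] at h
      obtain ⟨hmem, hge, hall⟩ := ih a h
      have hax : pvLexGe a x := by
        simp only [Bool.not_eq_true, Bool.or_eq_false_iff, Bool.and_eq_false_iff,
          Bool.not_eq_false', decide_eq_true_eq, decide_eq_false_iff_not] at hc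
        unfold pvLexGe; omega
      refine ⟨?_, hge, ?_⟩
      · rcases hmem with rfl | hm
        · exact Or.inl rfl
        · exact Or.inr (List.mem_cons_of_mem _ hm)
      · intro y hy
        rcases List.mem_cons.mp hy with rfl | hy
        · exact pvLexGe_trans m a y hge hax
        · exact hall _ hy

theorem pv_max2_spec (xs : List (Int × Int)) (m : Int × Int)
    (h : PySem.List.max2? xs (fun p => p.1) (fun p => p.2) = some m) :
    m ∈ xs ∧ ∀ x ∈ xs, pvLexGe m x := by
  rw [pv_max2_eq_foldl] at h
  cases xs with
  | nil => simp at h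
  | cons x xs =>
    have h' : xs.foldl pvStep (some x) = some m := by
      simpa only [List.foldl_cons, pvStep] using h
    obtain ⟨hmem, hge, hall⟩ := pv_max2_foldl_spec xs x m h'
    refine ⟨?_, ?_⟩
    · rcases hmem with rfl | hm
      · exact List.mem_cons_self
      · exact List.mem_cons_of_mem _ hm
    · intro y hy
      rcases List.mem_cons.mp hy with rfl | hy
      · exact hge
      · exact hall _ hy

theorem pv_max2_eq_none (xs : List (Int × Int))
    (h : PySem.List.max2? xs (fun p => p.1) (fun p => p.2) = none) : xs = [] := by
  rw [pv_max2_eq_foldl] at h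
  cases xs with
  | nil => rfl
  | cons x xs =>
    exfalso
    have hinv : ∀ (ys : List (Int × Int)) (a : Int × Int),
        ys.foldl pvStep (some a) ≠ none := by
      intro ys
      induction ys with
      | nil => intro a; simp
      | cons y ys ih =>
        intro a
        simp only [List.foldl_cons, pvStep]
        by_cases hc : (decide (a.1 < y.1) || (!decide (y.1 < a.1) && decide (a.2 < y.2))) = true
        · rw [if_pos hc]; exact ih y
        · rw [if_neg hc]; exact ih a
    exact hinv xs x (by simpa only [List.foldl_cons, pvStep] using h)

-- head of the descending sort is the first lexicographic maximum: pull it off.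
theorem pv_sortDesc_cons_max (xs : List (Int × Int)) (best : Int × Int)
    (h : PySem.List.max2? xs (fun p => p.1) (fun p => p.2) = some best) :
    PySem.List.sorted2 xs (fun p => p.1) (fun p => p.2) true
      = best :: PySem.List.sorted2 (xs.erase best) (fun p => p.1) (fun p => p.2) true := by
  obtain ⟨hmem, hmax⟩ := pv_max2_spec xs best h
  apply List.Perm.eq_of_pairwise (le := pvLexGe)
  · intro a b _ _ h1 h2; exact pvLexGe_antisymm a b h1 h2
  · exact pv_sortDesc_pairwise xs
  · refine List.Pairwise.cons ?_ (pv_sortDesc_pairwise (xs.erase best))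
    intro z hz
    have hz' : z ∈ xs.erase best :=
      ((PySem.List.sorted2_perm (xs.erase best) (fun p => p.1) (fun p => p.2) true).mem_iff).mp hz
    exact hmax _ (List.mem_of_mem_erase hz')
  · exact (PySem.List.sorted2_perm xs _ _ true).trans
      ((List.perm_cons_erase hmem).trans
        ((PySem.List.sorted2_perm (xs.erase best) _ _ true).symm.cons best))

-- the selection loop produces exactly the first k entries of the descending sort, mapped to tags.
theorem pv_select_eq_sorted (tags : List String) (k : Nat) (xs : List (Int × Int)) :
    pvSelect tags k xs
      = ((PySem.List.slice (PySem.List.sorted2 xs (fun p => p.1) (fun p => p.2) true)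
            none (some (k : Int))).map (fun p => PySem.List.pyGetD tags p.2 "")) := by
  rw [PySem.List.slice_to_natCast]
  induction k generalizing xs with
  | zero => simp [pvSelect]
  | succ k ih =>
    rcases hm : PySem.List.max2? xs (fun p => p.1) (fun p => p.2) with _ | best
    · have hnil : xs = [] := pv_max2_eq_none xs hm
      subst hnil
      simp only [pvSelect, hm]
      rfl
    · have hmem := (pv_max2_spec xs best hm).1
      rw [pvSelect]
      simp only [hm, PySem.List.remove?_eq_some_erase xs best hmem, Option.getD_some]
      rw [pv_sortDesc_cons_max xs best hm, List.take_succ_cons, List.map_cons, ih]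

-- enumerate as a map over range.
theorem pv_enumerate_eq {α : Type} [Inhabited α] (xs : List α) (s : Int) :
    PySem.List.enumerate xs s
      = (List.range xs.length).map (fun (k : Nat) => (s + (k : Int), xs.getD k default)) := by
  induction xs generalizing s with
  | nil => simp [PySem.List.enumerate]
  | cons x xs ih =>
    rw [PySem.List.enumerate_cons, ih, List.length_cons, List.range_succ_eq_map,
      List.map_cons, List.map_map]
    congr 1
    · simp
    · apply List.map_congr_left
      intro k _
      simp only [Function.comp_apply, List.getD_cons_succ, Nat.succ_eq_add_one]
      congr 1
      push_cast; ring

-- the common off-diagonal score.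
def pvOffSum (row : List Int) (n k : Nat) : Int :=
  (((List.range n).filter (fun a => a != k)).map (fun a => row.getD a 0)).sum

-- A's filtered comprehension sum equals pvOffSum.
theorem pv_sumA_eq (row : List Int) (n k : Nat) :
    ((((List.range n).map (fun a : Nat => (a : Int))).filter (fun j => j != (k : Int))).map
        (fun j => PySem.List.pyGetD row j 0)).sum = pvOffSum row n k := by
  rw [List.filter_map, List.map_map]
  rw [List.filter_congr (fun a (_ : a ∈ List.range n) => (by by_cases h : a = k <;> simp [bne, Nat.cast_inj, h] : ((fun j => j != (k:Int)) ∘ (fun a : Nat => (a:Int))) a = (a != k)))]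
  rw [List.map_congr_left (fun a (_ : a ∈ (List.range n).filter (fun a => a != k)) =>
    (by simp [PySem.List.pyGetD_natCast] :
      ((fun j => PySem.List.pyGetD row j 0) ∘ (fun a : Nat => (a:Int))) a = row.getD a 0))]
  rfl

-- B's running accumulation over enumerate(row[:n]) equals pvOffSum (n ≤ row length).
theorem pv_sumB_foldl (row : List Int) (k : Nat) :
    ∀ (js : List Nat) (t0 : Int),
      ((js.map (fun (j : Nat) => ((j : Int), row.getD j 0))).foldl
          (fun t q => if q.1 != (k : Int) then t + q.2 else t) t0)
        = t0 + ((js.filter (fun a => a != k)).map (fun a => row.getD a 0)).sum := by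
  intro js
  induction js with
  | nil => intro t0; simp
  | cons j js ih =>
    intro t0
    by_cases h : j = k
    · subst h
      simp only [List.map_cons, List.foldl_cons, List.filter_cons]
      rw [if_neg (by simp), ih]
      simp
    · simp only [List.map_cons, List.foldl_cons, List.filter_cons]
      rw [if_pos (by simp [bne, Nat.cast_inj, h]), ih]
      simp [bne, h, add_assoc]

theorem pv_sumB_eq (row : List Int) (n k : Nat) (hn : n ≤ row.length) :
    ((PySem.List.enumerate (PySem.List.slice row none (some (n : Int)))).foldl
        (fun t q => if q.1 != (k : Int) then t + q.2 else t) 0) = pvOffSum row n k := by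
  rw [PySem.List.slice_to_natCast, pv_enumerate_eq]
  have hlen : (row.take n).length = n := by simp [Nat.min_eq_left hn]
  have hget : ∀ a ∈ List.range n, (row.take n).getD a default = row.getD a 0 := by
    intro a ha
    have ha' : a < n := List.mem_range.mp ha
    have har : a < row.length := lt_of_lt_of_le ha' hn
    simp [List.getD, ha', List.getElem?_eq_getElem har]
  rw [hlen]
  rw [List.map_congr_left (fun a ha => by
    simp only [zero_add]
    rw [hget a ha] :
    ∀ a ∈ List.range n, (fun (j : Nat) => ((0 : Int) + (j : Int), (row.take n).getD j default)) a
      = (fun (j : Nat) => ((j : Int), row.getD j 0)) a)]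
  rw [pv_sumB_foldl row k (List.range n) 0]
  simp [pvOffSum]

-- the two score lists are equal on Pre_.
theorem pv_scores_eq (cm : List (List Int)) (hrows : ∀ row ∈ cm, cm.length ≤ row.length) :
    (PySem.List.pyRange 0 (cm.length : Int)).foldl (fun acc i =>
        acc ++ [((((PySem.List.pyRange 0 (cm.length : Int)).filter (fun j => j != i)).map
                    (fun j => PySem.List.pyGetD (PySem.List.pyGetD cm i []) j 0)).sum, i)]) []
      = (PySem.List.enumerate cm).foldl (fun acc p =>
          acc ++ [(((PySem.List.enumerate (PySem.List.slice p.2 none (some (cm.length : Int)))).foldl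
                      (fun t q => if q.1 != p.1 then t + q.2 else t) 0), p.1)]) [] := by
  rw [PySem.List.foldl_append_singleton_eq_map, PySem.List.foldl_append_singleton_eq_map,
    List.nil_append, List.nil_append, pv_enumerate_eq, PySem.List.pyRange_zero_natCast,
    List.map_map, List.map_map]
  apply List.map_congr_left
  intro k hk
  have hk' : k < cm.length := List.mem_range.mp hk
  have hgetcm : cm.getD k [] = cm[k] := by
    simp [List.getD, List.getElem?_eq_getElem hk']
  have hrow : cm.length ≤ (cm.getD k []).length := by
    rw [hgetcm]; exact hrows _ (List.getElem_mem _)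
  have hd : (default : List Int) = [] := rfl
  simp only [Function.comp_apply, zero_add, hd]
  rw [PySem.List.pyGetD_natCast]
  rw [pv_sumA_eq (cm.getD k []) cm.length k, pv_sumB_eq (cm.getD k []) cm.length k hrow]

-- ===== VERDICT (by name: the statement is the Claim_ definition above) =====
theorem top_10_confused_tags_spec : Claim_equal_top_10_confused_tags := by
  intro cm tags _ hpre
  unfold Spec_top_10_confused_tags top_10_confused_tags top_10_confused_tags_alt
  rw [pv_scores_eq cm hpre.2, pv_select_eq_sorted]
  norm_num
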